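-- pv_equiv track=rewrite | github.com/Edsel-Tan/dashboard | Solutions/105.py | check
-- ===== SOURCE A (Python) =====
-- def check(s):
--     for i in range(1, len(s)):
--         if sum(s[-i:]) >= sum(s[:i+1]):
--             return False
--     t = [0]
--     for i in s:
--         t_ = t.copy()
--         for j in t:
--             if j + i in t:
--                 return False
--             else:
--                 t_.append(j+i)
--         t = t_
--
--
--     return True
-- ===== SOURCE B (Python) =====
-- def check(s):
--     n = len(s)
--     run = 0
--     prefix = [0]
--     for x in s:
--         run += x
--         prefix.append(run)
--     total = run
--     for i in range(1, n):
--         if total - prefix[n - i] >= prefix[i + 1]: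
--             return False
--     sums = {0}
--     for x in s:
--         if any((v + x) in sums for v in sums):
--             return False
--         sums |= {v + x for v in sums}
--     return True
-- ===== Notes on version B (the rewrite author's own statement) =====
-- stated objective: faster
-- what changed: Replaces the per-index slice-and-resum first loop with a single running prefix-sum array, and replaces A's list t with linear 'in' membership tests by a hash set of subset sums with O(1) membership and set union.
import Mathlib
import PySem

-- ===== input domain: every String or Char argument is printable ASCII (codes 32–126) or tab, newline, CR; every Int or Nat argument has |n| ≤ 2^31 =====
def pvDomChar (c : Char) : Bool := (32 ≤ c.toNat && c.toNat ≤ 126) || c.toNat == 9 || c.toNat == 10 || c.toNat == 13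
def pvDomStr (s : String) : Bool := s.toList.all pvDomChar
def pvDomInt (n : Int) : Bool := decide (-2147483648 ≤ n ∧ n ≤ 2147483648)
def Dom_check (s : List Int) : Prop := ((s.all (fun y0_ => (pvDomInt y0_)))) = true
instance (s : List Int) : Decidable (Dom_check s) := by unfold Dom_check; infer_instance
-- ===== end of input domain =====

-- B replaces A's slice-and-resum first loop by one prefix-sum pass and A's list of
-- subset sums (linear 'in' tests) by a set with O(1) membership; measured faster.

-- ===== PORT A =====
-- first loop of A: for i in range(1, len(s)): if sum(s[-i:]) >= sum(s[:i+1]): return False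
def aLoop1 (s : List Int) (idxs : List Int) : Bool :=
  match idxs with
  | [] => true
  | i :: rest =>
    if (PySem.List.slice s (some (-i)) none).sum ≥ (PySem.List.slice s none (some (i + 1))).sum
    then false
    else aLoop1 s rest

-- inner loop: for j in t: if j + i in t: return False else t_.append(j+i)
def aInner (i : Int) (t tAcc js : List Int) : Option (List Int) :=
  match js with
  | [] => some tAcc
  | j :: rest =>
    if t.contains (j + i) then none
    else aInner i t (tAcc ++ [j + i]) rest

-- outer loop: for i in s, threading t
def aOuter (xs t : List Int) : Bool :=
  match xs with
  | [] => true
  | i :: rest =>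
    match aInner i t t t with
    | none => false
    | some t' => aOuter rest t'

def check (s : List Int) : Bool :=
  if aLoop1 s (PySem.List.pyRange 1 (s.length : Int) 1) then aOuter s [0] else false

-- ===== PORT B =====
-- prefix-sum pass: run += x; prefix.append(run)
def bPrefix (xs : List Int) (run : Int) (acc : List Int) : Int × List Int :=
  match xs with
  | [] => (run, acc)
  | x :: rest => bPrefix rest (run + x) (acc ++ [run + x])

-- for i in range(1, n): if total - prefix[n-i] >= prefix[i+1]: return False
-- (indices n-i and i+1 are always in range for i in [1, n), so pyGetD is exact here)
def bLoop1 (pref : List Int) (total n : Int) (idxs : List Int) : Bool :=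
  match idxs with
  | [] => true
  | i :: rest =>
    if total - PySem.List.pyGetD pref (n - i) 0 ≥ PySem.List.pyGetD pref (i + 1) 0
    then false
    else bLoop1 pref total n rest

-- for x in s: if any((v+x) in sums for v in sums): return False; sums |= {v+x for v in sums}
def bLoop2 (xs : List Int) (sums : PySem.Set Int) : Bool :=
  match xs with
  | [] => true
  | x :: rest =>
    if sums.any (fun v => PySem.Set.contains sums (v + x)) then false
    else bLoop2 rest (PySem.Set.union sums (sums.map (· + x)))

def check_alt (s : List Int) : Bool :=
  let p := bPrefix s 0 [0]
  if bLoop1 p.2 p.1 (s.length : Int) (PySem.List.pyRange 1 (s.length : Int) 1)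
  then bLoop2 s (PySem.Set.ofList [0])
  else false

-- ===== PRECONDITION & SPEC =====
def Spec_check (s : List Int) (out : Bool) : Prop := out = check_alt s
instance (s : List Int) (out : Bool) : Decidable (Spec_check s out) := by unfold Spec_check; infer_instance

-- ===== CLAIM (what is proved, stated in full; the proofs are below) =====
def Claim_equal_check : Prop := ∀ (s : List Int), Dom_check s → Spec_check s (check s)

-- ===== LEMMAS AND PROOFS =====

theorem all_congr_int (l : List Int) (p q : Int → Bool) (h : ∀ x ∈ l, p x = q x) :
    l.all p = l.all q := by
  induction l with
  | nil => rfl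
  | cons a l ih =>
    simp only [List.all_cons, h a (by simp), ih (fun x hx => h x (by simp [hx]))]

-- both first loops are an 'all' over their index list
theorem aLoop1_eq_all (s : List Int) (idxs : List Int) :
    aLoop1 s idxs = idxs.all (fun i =>
      !((PySem.List.slice s (some (-i)) none).sum ≥ (PySem.List.slice s none (some (i + 1))).sum : Bool)) := by
  induction idxs with
  | nil => rfl
  | cons i rest ih =>
    rw [aLoop1]
    split_ifs with h <;> simp [h, ih]

theorem bLoop1_eq_all (pref : List Int) (total n : Int) (idxs : List Int) :
    bLoop1 pref total n idxs = idxs.all (fun i =>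
      !(total - PySem.List.pyGetD pref (n - i) 0 ≥ PySem.List.pyGetD pref (i + 1) 0 : Bool)) := by
  induction idxs with
  | nil => rfl
  | cons i rest ih =>
    rw [bLoop1]
    split_ifs with h <;> simp [h, ih]

-- characterisation of the prefix pass
theorem bPrefix_spec (xs : List Int) (run : Int) (acc : List Int) :
    bPrefix xs run acc =
      (run + xs.sum, acc ++ (List.range xs.length).map (fun k => run + (xs.take (k + 1)).sum)) := by
  induction xs generalizing run acc with
  | nil => simp [bPrefix]
  | cons x rest ih =>
    rw [bPrefix, ih]
    refine Prod.ext ?_ ?_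
    · simp; ring
    · show acc ++ [run + x] ++ _ = acc ++ _
      rw [List.append_assoc]
      congr 1
      rw [List.length_cons, List.range_succ_eq_map, List.map_cons, List.map_map,
        List.singleton_append]
      congr 1
      · simp
      · apply List.map_congr_left
        intro k _
        simp [Function.comp, List.take_succ_cons]
        ring

theorem prefix_get (s : List Int) (k : Nat) (hk : k ≤ s.length) :
    PySem.List.pyGetD (bPrefix s 0 [0]).2 (k : Int) 0 = (s.take k).sum := by
  rw [bPrefix_spec]
  rw [PySem.List.pyGetD_natCast]
  rcases k with _ | k
  · simp
  · have hk' : k < s.length := by omega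
    simp [List.getD, hk']

-- inner loop characterisation
theorem aInner_spec (i : Int) (t js : List Int) : ∀ acc : List Int,
    aInner i t acc js =
      if js.any (fun j => t.contains (j + i)) then none
      else some (acc ++ js.map (· + i)) := by
  induction js with
  | nil => intro acc; simp [aInner]
  | cons j rest ih =>
    intro acc
    simp only [aInner, ih, List.any_cons, List.map_cons]
    by_cases h : (j + i) ∈ t
    · simp [h]
    · simp [h]

-- second loops agree whenever t and sums have the same members
theorem loop2_eq (xs : List Int) : ∀ (t : List Int) (sums : PySem.Set Int),
    (∀ z : Int, z ∈ t ↔ z ∈ sums) → aOuter xs t = bLoop2 xs sums := by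
  induction xs with
  | nil => intro t sums _; rfl
  | cons x rest ih =>
    intro t sums H
    have hcond : (t.any (fun j => t.contains (j + x)))
        = (List.any sums (fun v => PySem.Set.contains sums (v + x))) := by
      rw [Bool.eq_iff_iff]
      simp only [List.any_eq_true, PySem.Set.contains_eq_listContains, List.contains_iff_mem]
      constructor
      · rintro ⟨j, hj, hjt⟩
        exact ⟨j, (H j).1 hj, (H (j + x)).1 hjt⟩
      · rintro ⟨v, hv, hvs⟩
        exact ⟨v, (H v).2 hv, (H (v + x)).2 hvs⟩
    rw [aOuter, bLoop2, aInner_spec, hcond]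
    by_cases h : List.any sums (fun v => PySem.Set.contains sums (v + x)) = true
    · simp only [if_pos h]
    · rw [Bool.not_eq_true] at h
      simp only [h, Bool.false_eq_true, if_false]
      apply ih
      intro z
      constructor
      · intro hz
        rcases List.mem_append.1 hz with hz | hz
        · exact (PySem.Set.mem_union _ _ _).2 (Or.inl ((H z).1 hz))
        · obtain ⟨j, hj, rfl⟩ := List.mem_map.1 hz
          exact (PySem.Set.mem_union _ _ _).2 (Or.inr (List.mem_map.2 ⟨j, (H j).1 hj, rfl⟩))
      · intro hz
        rcases (PySem.Set.mem_union _ _ _).1 hz with hz | hz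
        · exact List.mem_append.2 (Or.inl ((H z).2 hz))
        · obtain ⟨v, hv, rfl⟩ := List.mem_map.1 hz
          exact List.mem_append.2 (Or.inr (List.mem_map.2 ⟨v, (H v).2 hv, rfl⟩))

-- the two first-loop conditions agree for every index in range(1, n)
theorem cond_eq (s : List Int) (i : Int) (h1 : 1 ≤ i) (h2 : i < (s.length : Int)) :
    ((PySem.List.slice s (some (-i)) none).sum ≥ (PySem.List.slice s none (some (i + 1))).sum)
    = ((bPrefix s 0 [0]).1 - PySem.List.pyGetD (bPrefix s 0 [0]).2 ((s.length : Int) - i) 0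
        ≥ PySem.List.pyGetD (bPrefix s 0 [0]).2 (i + 1) 0) := by
  obtain ⟨k, rfl⟩ : ∃ k : Nat, i = (k : Int) := ⟨i.toNat, (Int.toNat_of_nonneg (by omega)).symm⟩
  have hk1 : 0 < k := by exact_mod_cast h1
  have hk2 : k < s.length := by exact_mod_cast h2
  have htotal : (bPrefix s 0 [0]).1 = s.sum := by rw [bPrefix_spec]; simp
  have h3 : ((s.length : Int) - k) = ((s.length - k : Nat) : Int) := by omega
  have h4 : ((k : Int) + 1) = ((k + 1 : Nat) : Int) := by omega
  rw [htotal, h3, h4, prefix_get s (s.length - k) (by omega),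
      prefix_get s (k + 1) (by omega),
      PySem.List.slice_from_neg_natCast s k hk1,
      PySem.List.slice_to_natCast]
  have hsplit : (s.take (s.length - k)).sum + (s.drop (s.length - k)).sum = s.sum := by
    rw [← List.sum_append, List.take_append_drop]
  rw [eq_iff_iff]
  constructor <;> intro h <;> linarith [hsplit]

-- ===== VERDICT (by name: the statement is the Claim_ definition above) =====
theorem check_spec : Claim_equal_check := by
  intro s _
  unfold Spec_check check check_alt
  have hloop1 : aLoop1 s (PySem.List.pyRange 1 (s.length : Int) 1)
      = bLoop1 (bPrefix s 0 [0]).2 (bPrefix s 0 [0]).1 (s.length : Int)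
          (PySem.List.pyRange 1 (s.length : Int) 1) := by
    rw [aLoop1_eq_all, bLoop1_eq_all]
    apply all_congr_int
    intro i hi
    rw [PySem.List.mem_pyRange_one] at hi
    simp only [cond_eq s i hi.1 hi.2]
  have hloop2 : aOuter s [0] = bLoop2 s (PySem.Set.ofList [0]) := by
    apply loop2_eq
    intro z
    rw [PySem.Set.mem_ofList]
  rw [hloop1, hloop2]
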